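-- pv_equiv track=rewrite | github.com/ggnb367/PtoPdistance | fenceng_test.py | build_ab_topk_from_boundary_to_cluster
-- ===== SOURCE A (Python) =====
-- from collections import defaultdict, Counter
--
-- def build_ab_topk_from_boundary_to_cluster(boundary_to_cluster_D, boundary_sets, topk_mid=16):
--     """
--     为 (A,B) 组装 “b -> (mid,c)” 的 Top-K 候选（按 mid 升序）。
--     修复了原实现中的局部变量遮蔽与死分支问题。
--     """
--     AB_topk = defaultdict(lambda: defaultdict(list))
--     b2A = {}
--     for A, bset in boundary_sets.items():
--         for b in bset:
--             b2A[b] = A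
--
--     items_by_AB = defaultdict(lambda: defaultdict(list))
--     for b, perB in boundary_to_cluster_D.items():
--         A = b2A.get(b)
--         if A is None:
--             continue
--         for B, (mid, c) in perB.items():
--             items_by_AB[A][B].append((mid, b, c))
--
--     for A in items_by_AB:
--         for B in items_by_AB[A]:
--             curr = items_by_AB[A][B]
--             curr.sort(key=lambda x: x[0])
--             keep = curr[:topk_mid]
--             AB_topk[A][B] = [(b, mid, c) for (mid, b, c) in keep]
--     return AB_topk
-- ===== SOURCE B (Python) =====
-- from collections import defaultdict
--
--
-- def build_ab_topk_from_boundary_to_cluster(boundary_to_cluster_D, boundary_sets, topk_mid=16):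
--     # Global-sort decomposition: flatten everything, one stable sort by mid,
--     # then a single capped pass that distributes into the (A,B) groups.
--     b2A = {b: A for A, bset in boundary_sets.items() for b in bset}
--     flat = []
--     for b, perB in boundary_to_cluster_D.items():
--         A = b2A.get(b)
--         if A is None:
--             continue
--         for B, (mid, c) in perB.items():
--             flat.append((A, B, mid, b, c))
--     out = defaultdict(lambda: defaultdict(list))
--     for (A, B, _mid, _b, _c) in flat:
--         out[A][B]  # create the group slot, in first-occurrence order
--     for (A, B, mid, b, c) in sorted(flat, key=lambda t: t[2]):
--         g = out[A][B]
--         if len(g) < topk_mid: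
--             g.append((b, mid, c))
--     return out
-- ===== Notes on version B (the rewrite author's own statement) =====
-- stated objective: alternative
-- what changed: Instead of building nested per-(A,B) buckets and sorting+slicing each one, B flattens all boundary items into one list, performs a single global stable sort by mid, and fills the lazily-created groups in one capped pass (stop appending once a group holds topk_mid entries).
import Mathlib
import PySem

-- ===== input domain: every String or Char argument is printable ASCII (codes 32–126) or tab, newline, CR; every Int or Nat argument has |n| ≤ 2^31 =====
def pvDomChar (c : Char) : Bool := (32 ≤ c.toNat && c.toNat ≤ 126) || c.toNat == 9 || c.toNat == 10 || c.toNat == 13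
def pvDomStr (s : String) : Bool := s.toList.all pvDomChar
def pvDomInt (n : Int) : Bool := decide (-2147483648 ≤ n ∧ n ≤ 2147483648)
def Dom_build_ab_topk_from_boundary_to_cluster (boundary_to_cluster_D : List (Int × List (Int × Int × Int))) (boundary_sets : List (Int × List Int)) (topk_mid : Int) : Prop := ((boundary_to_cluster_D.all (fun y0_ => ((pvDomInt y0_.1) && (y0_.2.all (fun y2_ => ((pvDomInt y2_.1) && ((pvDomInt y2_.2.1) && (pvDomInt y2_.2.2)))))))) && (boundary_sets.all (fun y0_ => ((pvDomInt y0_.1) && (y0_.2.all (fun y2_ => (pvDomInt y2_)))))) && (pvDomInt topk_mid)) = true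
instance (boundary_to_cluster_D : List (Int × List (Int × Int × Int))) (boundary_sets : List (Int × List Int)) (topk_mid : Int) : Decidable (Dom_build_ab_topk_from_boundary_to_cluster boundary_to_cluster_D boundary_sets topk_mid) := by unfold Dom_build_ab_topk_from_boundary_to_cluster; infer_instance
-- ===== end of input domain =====

-- B replaces A's per-(A,B) sort+slice with one global stable sort by mid and a single
-- capped distribution pass (objective: alternative decomposition, same asymptotic cost).

-- ===== PORT A =====
def build_ab_topk_from_boundary_to_cluster (boundary_to_cluster_D : List (Int × List (Int × Int × Int))) (boundary_sets : List (Int × List Int)) (topk_mid : Int) : List (Int × List (Int × List (Int × Int × Int))) :=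
  let b2A : PySem.Dict Int Int :=
    boundary_sets.foldl (fun d p => p.2.foldl (fun d b => d.insert b p.1) d) PySem.Dict.empty
  let items_by_AB : PySem.Dict Int (PySem.Dict Int (List (Int × Int × Int))) :=
    boundary_to_cluster_D.foldl (fun acc p =>
      match b2A.get? p.1 with
      | none => acc
      | some A => p.2.foldl (fun acc q =>
          acc.modify A PySem.Dict.empty (fun dB => dB.modify q.1 [] (fun l => l ++ [(q.2.1, p.1, q.2.2)]))) acc)
      PySem.Dict.empty
  let AB_topk : PySem.Dict Int (PySem.Dict Int (List (Int × Int × Int))) :=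
    items_by_AB.items.foldl (fun acc pA =>
      pA.2.items.foldl (fun acc pB =>
        acc.modify pA.1 PySem.Dict.empty (fun dB =>
          dB.insert pB.1
            ((PySem.List.slice (PySem.List.sorted pB.2 (fun x => x.1) false) none (some topk_mid)).map
              (fun x => (x.2.1, x.1, x.2.2))))) acc)
      PySem.Dict.empty
  AB_topk.items.map (fun pA => (pA.1, pA.2.items))

-- ===== PORT B =====
def build_ab_topk_from_boundary_to_cluster_alt (boundary_to_cluster_D : List (Int × List (Int × Int × Int))) (boundary_sets : List (Int × List Int)) (topk_mid : Int) : List (Int × List (Int × List (Int × Int × Int))) :=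
  let b2A : PySem.Dict Int Int :=
    boundary_sets.foldl (fun d p => p.2.foldl (fun d b => d.insert b p.1) d) PySem.Dict.empty
  let flat : List (Int × Int × Int × Int × Int) :=
    boundary_to_cluster_D.foldl (fun fl p =>
      match b2A.get? p.1 with
      | none => fl
      | some A => p.2.foldl (fun fl q => fl ++ [(A, q.1, q.2.1, p.1, q.2.2)]) fl) []
  let out0 : PySem.Dict Int (PySem.Dict Int (List (Int × Int × Int))) :=
    flat.foldl (fun d t => d.modify t.1 PySem.Dict.empty (fun dB => dB.modify t.2.1 [] id)) PySem.Dict.empty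
  let out : PySem.Dict Int (PySem.Dict Int (List (Int × Int × Int))) :=
    (PySem.List.sorted flat (fun t => t.2.2.1) false).foldl (fun d t =>
      d.modify t.1 PySem.Dict.empty (fun dB => dB.modify t.2.1 [] (fun g =>
        if (g.length : Int) < topk_mid then g ++ [(t.2.2.2.1, t.2.2.1, t.2.2.2.2)] else g))) out0
  out.items.map (fun pA => (pA.1, pA.2.items))

-- ===== PRECONDITION & SPEC =====
-- Pre_ excludes negative topk_mid, on which A's 'curr[:topk_mid]' slice takes Python's
-- negative-bound meaning and drops the |topk_mid| largest entries of each group — an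
-- accident of slicing that no caller of a "top-k" builder would specify; B keeps nothing there.
def Pre_build_ab_topk_from_boundary_to_cluster (boundary_to_cluster_D : List (Int × List (Int × Int × Int))) (boundary_sets : List (Int × List Int)) (topk_mid : Int) : Prop :=
  0 ≤ topk_mid
instance (boundary_to_cluster_D : List (Int × List (Int × Int × Int))) (boundary_sets : List (Int × List Int)) (topk_mid : Int) : Decidable (Pre_build_ab_topk_from_boundary_to_cluster boundary_to_cluster_D boundary_sets topk_mid) := by unfold Pre_build_ab_topk_from_boundary_to_cluster; infer_instance

def pvWitness_build_ab_topk_from_boundary_to_cluster : (List (Int × List (Int × Int × Int))) × (List (Int × List Int)) × Int :=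
  ([(1, [(2, 3, 4)]), (6, [(2, 1, 7)])], [(5, [1, 6])], 1)

def Spec_build_ab_topk_from_boundary_to_cluster (boundary_to_cluster_D : List (Int × List (Int × Int × Int))) (boundary_sets : List (Int × List Int)) (topk_mid : Int) (out : List (Int × List (Int × List (Int × Int × Int)))) : Prop := out = build_ab_topk_from_boundary_to_cluster_alt boundary_to_cluster_D boundary_sets topk_mid
instance (boundary_to_cluster_D : List (Int × List (Int × Int × Int))) (boundary_sets : List (Int × List Int)) (topk_mid : Int) (out : List (Int × List (Int × List (Int × Int × Int)))) : Decidable (Spec_build_ab_topk_from_boundary_to_cluster boundary_to_cluster_D boundary_sets topk_mid out) := by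
  unfold Spec_build_ab_topk_from_boundary_to_cluster
  exact @instDecidableEqList _ (@instDecidableEqProd _ _ _ (@instDecidableEqList _ (@instDecidableEqProd _ _ _ (@instDecidableEqList _ inferInstance)))) _ _

-- ===== CLAIM (what is proved, stated in full; the proofs are below) =====
def Claim_equal_build_ab_topk_from_boundary_to_cluster : Prop := ∀ (boundary_to_cluster_D : List (Int × List (Int × Int × Int))) (boundary_sets : List (Int × List Int)) (topk_mid : Int), Dom_build_ab_topk_from_boundary_to_cluster boundary_to_cluster_D boundary_sets topk_mid → Pre_build_ab_topk_from_boundary_to_cluster boundary_to_cluster_D boundary_sets topk_mid → Spec_build_ab_topk_from_boundary_to_cluster boundary_to_cluster_D boundary_sets topk_mid (build_ab_topk_from_boundary_to_cluster boundary_to_cluster_D boundary_sets topk_mid)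


-- ===== LEMMAS AND PROOFS =====

-- the flattened item stream (A, B, mid, b, c), in A's iteration order
def pvFlatF (b2A : PySem.Dict Int Int) (D : List (Int × List (Int × Int × Int))) : List (Int × Int × Int × Int × Int) :=
  D.flatMap (fun p => match b2A.get? p.1 with
    | none => []
    | some A => p.2.map (fun q => (A, q.1, q.2.1, p.1, q.2.2)))

lemma pv_flat_fold (b2A : PySem.Dict Int Int) (D : List (Int × List (Int × Int × Int)))
    (acc : List (Int × Int × Int × Int × Int)) :
    D.foldl (fun fl p =>
      match b2A.get? p.1 with
      | none => fl
      | some A => p.2.foldl (fun fl q => fl ++ [(A, q.1, q.2.1, p.1, q.2.2)]) fl) acc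
    = acc ++ pvFlatF b2A D := by
  induction D generalizing acc with
  | nil => simp [pvFlatF]
  | cons p D ih =>
    simp only [List.foldl_cons, pvFlatF, List.flatMap_cons]
    cases h : b2A.get? p.1 with
    | none => simpa [pvFlatF] using ih acc
    | some A =>
      dsimp only
      rw [PySem.List.foldl_append_singleton_eq_map (f := fun q : Int × Int × Int => (A, q.1, q.2.1, p.1, q.2.2))]
      simpa [pvFlatF, List.append_assoc] using ih (acc ++ p.2.map (fun q => (A, q.1, q.2.1, p.1, q.2.2)))

lemma pv_items_fold (b2A : PySem.Dict Int Int) (D : List (Int × List (Int × Int × Int)))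
    (acc : PySem.Dict Int (PySem.Dict Int (List (Int × Int × Int)))) :
    D.foldl (fun acc p =>
      match b2A.get? p.1 with
      | none => acc
      | some A => p.2.foldl (fun acc q =>
          acc.modify A PySem.Dict.empty (fun dB => dB.modify q.1 [] (fun l => l ++ [(q.2.1, p.1, q.2.2)]))) acc) acc
    = (pvFlatF b2A D).foldl (fun d t =>
        d.modify t.1 PySem.Dict.empty (fun dB => dB.modify t.2.1 [] (fun l => l ++ [(t.2.2.1, t.2.2.2.1, t.2.2.2.2)]))) acc := by
  induction D generalizing acc with
  | nil => simp [pvFlatF]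
  | cons p D ih =>
    simp only [List.foldl_cons, pvFlatF, List.flatMap_cons, List.foldl_append]
    cases h : b2A.get? p.1 with
    | none => simpa [pvFlatF] using ih acc
    | some A =>
      dsimp only
      rw [List.foldl_map]
      simpa [pvFlatF] using ih _

lemma pv_getD_foldl_modify {β ν : Type} (L : List β) (k : β → Int) (d0 : ν) (f : β → ν → ν)
    (d : PySem.Dict Int ν) (c : Int) :
    (L.foldl (fun d t => d.modify (k t) d0 (f t)) d).getD c d0
    = (L.filter (fun t => k t == c)).foldl (fun v t => f t v) (d.getD c d0) := by
  induction L generalizing d with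
  | nil => simp
  | cons t L ih =>
    simp only [List.foldl_cons, List.filter_cons]
    by_cases h : k t = c
    · simp only [h, beq_self_eq_true, if_pos trivial, List.foldl_cons]
      rw [ih, PySem.Dict.getD_modify]
      simp
    · have hb : (k t == c) = false := by simp [h]
      simp only [hb, if_neg, Bool.false_eq_true, not_false_iff]
      rw [ih, PySem.Dict.getD_modify]
      simp [Ne.symm h]

-- ---- stable-sort lemmas ----

lemma pv_insertBy_front {α : Type} (key : α → Int) (x : α) (zs : List α)
    (h : ∀ z ∈ zs, key x < key z) :
    PySem.List.insertBy (fun a b => decide (key a < key b)) x zs = x :: zs := by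
  cases zs with
  | nil => rfl
  | cons z zs => simp [PySem.List.insertBy, h z (by simp)]

lemma pv_insertBy_map {α β : Type} (f : α → β) (key : α → Int) (key' : β → Int)
    (hk : ∀ a, key' (f a) = key a) (x : α) (ys : List α) :
    (PySem.List.insertBy (fun a b => decide (key a < key b)) x ys).map f
    = PySem.List.insertBy (fun a b => decide (key' a < key' b)) (f x) (ys.map f) := by
  induction ys with
  | nil => rfl
  | cons y ys ih =>
    by_cases h : key x < key y
    · simp [PySem.List.insertBy, h, hk]
    · simp [PySem.List.insertBy, h, hk, ih]

lemma pv_sorted_append_singleton {α : Type} (key : α → Int) (xs : List α) (x : α) :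
    PySem.List.sorted (xs ++ [x]) key false
    = PySem.List.insertBy (fun a b => decide (key a < key b)) x (PySem.List.sorted xs key false) := by
  rw [PySem.List.sorted_eq_foldl_insertBy, PySem.List.sorted_eq_foldl_insertBy, List.foldl_append]
  rfl

lemma pv_map_sorted {α β : Type} (f : α → β) (key : α → Int) (key' : β → Int)
    (hk : ∀ a, key' (f a) = key a) (xs : List α) :
    (PySem.List.sorted xs key false).map f = PySem.List.sorted (xs.map f) key' false := by
  induction xs using List.reverseRecOn with
  | nil => simp [PySem.List.sorted]
  | append_singleton xs x ih =>
    rw [pv_sorted_append_singleton, pv_insertBy_map f key key' hk, ih, List.map_append]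
    simp [pv_sorted_append_singleton]

lemma pv_filter_insertBy {α : Type} (key : α → Int) (p : α → Bool) (x : α) (ys : List α)
    (hys : ys.Pairwise (fun a b => key a ≤ key b)) :
    (PySem.List.insertBy (fun a b => decide (key a < key b)) x ys).filter p
    = if p x then PySem.List.insertBy (fun a b => decide (key a < key b)) x (ys.filter p)
      else ys.filter p := by
  induction ys with
  | nil => cases h : p x <;> simp [PySem.List.insertBy, h]
  | cons y ys ih =>
    rcases List.pairwise_cons.mp hys with ⟨hy, hys'⟩
    by_cases hlt : key x < key y
    · simp only [PySem.List.insertBy, decide_eq_true_eq, if_pos hlt]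
      cases hx : p x with
      | false => simp [hx, List.filter_cons]
      | true =>
        cases hpy : p y with
        | true => simp [hx, hpy, PySem.List.insertBy, hlt]
        | false =>
          have hfront : ∀ z ∈ ys.filter p, key x < key z := fun z hz =>
            lt_of_lt_of_le hlt (hy z (List.mem_of_mem_filter hz))
          simp [hx, hpy, pv_insertBy_front key x _ hfront]
    · simp only [PySem.List.insertBy, decide_eq_true_eq, if_neg hlt]
      cases hpy : p y with
      | true =>
        cases hx : p x with
        | false => simp [hpy, hx, ih hys']
        | true => simp [hpy, hx, ih hys', PySem.List.insertBy, hlt]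
      | false =>
        cases hx : p x with
        | false => simp [hpy, hx, ih hys']
        | true => simp [hpy, hx, ih hys']

lemma pv_filter_sorted {α : Type} (key : α → Int) (p : α → Bool) (xs : List α) :
    (PySem.List.sorted xs key false).filter p = PySem.List.sorted (xs.filter p) key false := by
  induction xs using List.reverseRecOn with
  | nil => simp [PySem.List.sorted]
  | append_singleton xs x ih =>
    rw [pv_sorted_append_singleton,
        pv_filter_insertBy key p x _ (PySem.List.sorted_pairwise xs key),
        List.filter_append]
    cases h : p x with
    | true => simp [h, ih, pv_sorted_append_singleton]
    | false => simp [h, ih]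

lemma pv_capped_fold {α β : Type} (topk : Int) (h0 : 0 ≤ topk) (f : α → β) (l : List α)
    (acc : List β) :
    l.foldl (fun g t => if (g.length : Int) < topk then g ++ [f t] else g) acc
    = acc ++ (l.take (topk.toNat - acc.length)).map f := by
  induction l generalizing acc with
  | nil => simp
  | cons t l ih =>
    simp only [List.foldl_cons]
    by_cases hl : (acc.length : Int) < topk
    · have hlt : acc.length < topk.toNat := by omega
      rw [if_pos hl, ih]
      have : topk.toNat - acc.length = (topk.toNat - (acc.length + 1)) + 1 := by omega
      simp [this, List.take_succ_cons, List.append_assoc]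
    · have : topk.toNat - acc.length = 0 := by omega
      rw [if_neg hl, ih, this]
      simp


-- ---- dict-rebuild lemmas ----

-- A's per-group transform: sort by mid, slice to topk, reorder fields
def pvTrans (topk : Int) (curr : List (Int × Int × Int)) : List (Int × Int × Int) :=
  (PySem.List.slice (PySem.List.sorted curr (fun x => x.1) false) none (some topk)).map
    (fun x => (x.2.1, x.1, x.2.2))

def pvInner (topk : Int) (dB : PySem.Dict Int (List (Int × Int × Int))) :
    PySem.Dict Int (List (Int × Int × Int)) :=
  dB.items.foldl (fun e q => e.insert q.1 (pvTrans topk q.2)) PySem.Dict.empty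

lemma pv_modify_fixed {β ν : Type} (A : Int) (d0 : ν) (f : β → ν → ν) (L : List β) (hne : L ≠ [])
    (d : PySem.Dict Int ν) :
    L.foldl (fun d x => d.modify A d0 (f x)) d
    = d.insert A (L.foldl (fun v x => f x v) (d.getD A d0)) := by
  induction L generalizing d with
  | nil => exact absurd rfl hne
  | cons x L ih =>
    cases L with
    | nil =>
      simp only [List.foldl_cons, List.foldl_nil]
      exact PySem.Dict.ext_iff.mpr rfl
    | cons y M =>
      rw [List.foldl_cons, ih (by simp), PySem.Dict.getD_modify_self]
      have hmi : d.modify A d0 (f x) = d.insert A (f x (d.getD A d0)) := PySem.Dict.ext_iff.mpr rfl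
      rw [hmi, PySem.Dict.insert_insert_self]; simp only [List.foldl_cons]

lemma pv_rebuild (topk : Int) (ps : List (Int × PySem.Dict Int (List (Int × Int × Int))))
    (h1 : (ps.map (fun p => p.1)).Nodup) (h2 : ∀ p ∈ ps, p.2.items ≠ [])
    (acc : PySem.Dict Int (PySem.Dict Int (List (Int × Int × Int))))
    (hacc : ∀ p ∈ ps, acc.contains p.1 = false) :
    (ps.foldl (fun acc pA =>
      pA.2.items.foldl (fun acc pB =>
        acc.modify pA.1 PySem.Dict.empty (fun dB => dB.insert pB.1 (pvTrans topk pB.2))) acc) acc).items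
    = acc.items ++ ps.map (fun pA => (pA.1, pvInner topk pA.2)) := by
  induction ps generalizing acc with
  | nil => simp
  | cons pA ps ih =>
    rw [List.foldl_cons,
        pv_modify_fixed pA.1 PySem.Dict.empty (fun pB dB => dB.insert pB.1 (pvTrans topk pB.2))
          pA.2.items (h2 pA (by simp)) acc]
    have hgd : acc.getD pA.1 PySem.Dict.empty = PySem.Dict.empty :=
      PySem.Dict.getD_of_not_contains _ _ (hacc pA (by simp))
    rw [hgd]
    have hnm : ¬ pA.1 ∈ ps.map (fun p => p.1) := (List.nodup_cons.mp h1).1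
    rw [ih (List.nodup_cons.mp h1).2
          (fun p hp => h2 p (List.mem_cons_of_mem _ hp))
          _
          (fun p hp => by
            rw [PySem.Dict.contains_insert]
            have : (p.1 == pA.1) = false := by
              simp only [beq_eq_false_iff_ne, ne_eq]
              intro he
              exact hnm (he ▸ List.mem_map_of_mem hp)
            simp [this, hacc p (List.mem_cons_of_mem _ hp)]),
        PySem.Dict.items_insert_of_not_contains _ _ (hacc pA (by simp))]
    simp [pvInner]



lemma pv_group_keys {β ν : Type} (L : List β) (k : β → Int) (d0 : ν) (f : β → ν → ν)
    (d : PySem.Dict Int ν) :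
    (L.foldl (fun d t => d.modify (k t) d0 (f t)) d).keys = PySem.Set.update d.keys (L.map k) := by
  have h := PySem.Dict.keys_foldl_modify_key L k d0 (fun _ t => f t) d
  exact h

lemma pv_group_nodup {β ν : Type} (L : List β) (k : β → Int) (d0 : ν) (f : β → ν → ν)
    (d : PySem.Dict Int ν) (hd : d.keys.Nodup) :
    (L.foldl (fun d t => d.modify (k t) d0 (f t)) d).keys.Nodup := by
  have h := PySem.Dict.nodup_keys_foldl_modify_key L k d0 (fun _ t => f t) d hd
  exact h

lemma pv_update_ofList (l : List Int) : PySem.Set.update [] l = PySem.Set.ofList l := by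
  rw [PySem.Set.update_eq_append_filter]
  simp

lemma pv_update_absorb (s : PySem.Set Int) (l : List Int) (h : ∀ y ∈ l, y ∈ s) :
    PySem.Set.update s l = s := by
  rw [PySem.Set.update_eq_append_filter]
  have : (PySem.Set.ofList l).filter (fun y => !s.contains y) = [] := by
    apply List.filter_eq_nil_iff.mpr
    intro y hy
    have hmem : y ∈ s := h y ((PySem.Set.mem_ofList l y).mp hy)
    simp [hmem]
  rw [this, List.append_nil]

-- the inner (per-A) grouping dict, fully described
lemma pv_igroup_items (L : List (Int × Int × Int × Int × Int)) :
    ((L.foldl (fun dB t => dB.modify t.2.1 [] (fun l => l ++ [(t.2.2.1, t.2.2.2.1, t.2.2.2.2)]))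
        PySem.Dict.empty)).items
    = (PySem.Set.ofList (L.map (fun t => t.2.1))).map
        (fun B => (B, (L.filter (fun t => t.2.1 == B)).map (fun t => (t.2.2.1, t.2.2.2.1, t.2.2.2.2)))) := by
  have hkeys := pv_group_keys L (fun t => t.2.1) ([] : List (Int × Int × Int))
    (fun t l => l ++ [(t.2.2.1, t.2.2.2.1, t.2.2.2.2)]) PySem.Dict.empty
  rw [PySem.Dict.keys_empty, pv_update_ofList] at hkeys
  have hnd := pv_group_nodup L (fun t => t.2.1) ([] : List (Int × Int × Int))
    (fun t l => l ++ [(t.2.2.1, t.2.2.2.1, t.2.2.2.2)]) PySem.Dict.empty PySem.Dict.nodup_keys_empty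
  rw [PySem.Dict.items_eq_map_keys _ hnd ([] : List (Int × Int × Int)), hkeys]
  apply List.map_congr_left
  intro B hB
  rw [pv_getD_foldl_modify L (fun t => t.2.1) ([] : List (Int × Int × Int))
      (fun t l => l ++ [(t.2.2.1, t.2.2.2.1, t.2.2.2.2)]) PySem.Dict.empty B,
    PySem.Dict.getD_empty,
    PySem.List.foldl_append_singleton_eq_map (fun t : Int × Int × Int × Int × Int => (t.2.2.1, t.2.2.2.1, t.2.2.2.2))]
  simp

lemma pv_core (topk : Int) (hpre : 0 ≤ topk) (G : List (Int × Int × Int × Int × Int)) :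
    pvTrans topk (G.map (fun t => (t.2.2.1, t.2.2.2.1, t.2.2.2.2)))
    = ((PySem.List.sorted G (fun t => t.2.2.1) false).take topk.toNat).map
        (fun t => (t.2.2.2.1, t.2.2.1, t.2.2.2.2)) := by
  unfold pvTrans
  rw [PySem.List.slice_to _ hpre,
      ← pv_map_sorted (fun t => (t.2.2.1, t.2.2.2.1, t.2.2.2.2)) (fun t => t.2.2.1)
        (fun x => x.1) (fun a => rfl) G,
      ← List.map_take, List.map_map]
  rfl

lemma pv_main (topk : Int) (hpre : 0 ≤ topk) (F : List (Int × Int × Int × Int × Int)) :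
    ((F.foldl (fun d t => d.modify t.1 PySem.Dict.empty
        (fun dB => dB.modify t.2.1 [] (fun l => l ++ [(t.2.2.1, t.2.2.2.1, t.2.2.2.2)]))) PySem.Dict.empty).items.foldl
      (fun acc pA => pA.2.items.foldl (fun acc pB =>
        acc.modify pA.1 PySem.Dict.empty (fun dB => dB.insert pB.1 (pvTrans topk pB.2))) acc)
      PySem.Dict.empty).items.map (fun pA => (pA.1, pA.2.items))
    =
    ((PySem.List.sorted F (fun t => t.2.2.1) false).foldl
      (fun d t => d.modify t.1 PySem.Dict.empty (fun dB => dB.modify t.2.1 [] (fun g =>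
        if (g.length : Int) < topk then g ++ [(t.2.2.2.1, t.2.2.1, t.2.2.2.2)] else g)))
      (F.foldl (fun d t => d.modify t.1 PySem.Dict.empty (fun dB => dB.modify t.2.1 [] id)) PySem.Dict.empty)).items.map
      (fun pA => (pA.1, pA.2.items)) := by
  set S := PySem.List.sorted F (fun t => t.2.2.1) false with hS
  set M := F.foldl (fun d t => d.modify t.1 PySem.Dict.empty
      (fun dB => dB.modify t.2.1 [] (fun l => l ++ [(t.2.2.1, t.2.2.2.1, t.2.2.2.2)]))) PySem.Dict.empty with hM
  set skel := F.foldl (fun d t => d.modify t.1 PySem.Dict.empty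
      (fun dB => dB.modify t.2.1 [] id)) PySem.Dict.empty with hskel
  -- outer key sets
  have hkeysM : M.keys = PySem.Set.ofList (F.map (fun t => t.1)) := by
    rw [hM, pv_group_keys, PySem.Dict.keys_empty, pv_update_ofList]
  have hnodupM : M.keys.Nodup := by
    rw [hM]; exact pv_group_nodup _ _ _ _ _ PySem.Dict.nodup_keys_empty
  have hkeysSkel : skel.keys = PySem.Set.ofList (F.map (fun t => t.1)) := by
    rw [hskel, pv_group_keys, PySem.Dict.keys_empty, pv_update_ofList]
  have hnodupSkel : skel.keys.Nodup := by
    rw [hskel]; exact pv_group_nodup _ _ _ _ _ PySem.Dict.nodup_keys_empty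
  have hSperm : S.Perm F := PySem.List.sorted_perm F _ false
  -- out-dict keys
  have hkeysOut : (S.foldl (fun d t =>
      d.modify t.1 PySem.Dict.empty (fun dB => dB.modify t.2.1 [] (fun g =>
        if (g.length : Int) < topk then g ++ [(t.2.2.2.1, t.2.2.1, t.2.2.2.2)] else g))) skel).keys
      = PySem.Set.ofList (F.map (fun t => t.1)) := by
    rw [pv_group_keys, hkeysSkel, pv_update_absorb]
    intro y hy
    rcases List.mem_map.mp hy with ⟨t, ht, rfl⟩
    exact (PySem.Set.mem_ofList _ _).mpr (List.mem_map_of_mem (hSperm.mem_iff.mp ht))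
  have hnodupOut : (S.foldl (fun d t =>
      d.modify t.1 PySem.Dict.empty (fun dB => dB.modify t.2.1 [] (fun g =>
        if (g.length : Int) < topk then g ++ [(t.2.2.2.1, t.2.2.1, t.2.2.2.2)] else g))) skel).keys.Nodup :=
    pv_group_nodup _ _ _ _ _ hnodupSkel
  -- description of M's items
  have hitemsM : M.items = (PySem.Set.ofList (F.map (fun t => t.1))).map
      (fun A => (A, M.getD A PySem.Dict.empty)) := by
    rw [PySem.Dict.items_eq_map_keys M hnodupM PySem.Dict.empty, hkeysM]
  have hMA : ∀ A : Int, M.getD A PySem.Dict.empty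
      = (F.filter (fun t => t.1 == A)).foldl
          (fun dB t => dB.modify t.2.1 [] (fun l => l ++ [(t.2.2.1, t.2.2.2.1, t.2.2.2.2)]))
          PySem.Dict.empty := by
    intro A
    rw [hM, pv_getD_foldl_modify F (fun t => t.1) PySem.Dict.empty
        (fun t dB => dB.modify t.2.1 [] (fun l => l ++ [(t.2.2.1, t.2.2.2.1, t.2.2.2.2)]))
        PySem.Dict.empty A, PySem.Dict.getD_empty]
  -- nonempty inner dicts
  have hne : ∀ A ∈ PySem.Set.ofList (F.map (fun t => t.1)),
      (M.getD A PySem.Dict.empty).items ≠ [] := by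
    intro A hA
    rcases List.mem_map.mp ((PySem.Set.mem_ofList _ _).mp hA) with ⟨t, ht, rfl⟩
    rw [hMA, pv_igroup_items]
    have htf : t ∈ F.filter (fun s => s.1 == t.1) := List.mem_filter.mpr ⟨ht, by simp⟩
    have : t.2.1 ∈ PySem.Set.ofList ((F.filter (fun s => s.1 == t.1)).map (fun s => s.2.1)) :=
      (PySem.Set.mem_ofList _ _).mpr (List.mem_map_of_mem htf)
    intro hcon
    rw [List.map_eq_nil_iff.mp hcon] at this
    exact absurd this (by simp)
  -- rewrite the A side
  rw [pv_rebuild topk M.items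
      (by exact hnodupM)
      (by intro p hp
          rw [hitemsM] at hp
          rcases List.mem_map.mp hp with ⟨A, hA, rfl⟩
          exact hne A hA)
      PySem.Dict.empty (fun p _ => PySem.Dict.contains_empty p.1),
    show (PySem.Dict.empty : PySem.Dict Int (PySem.Dict Int (List (Int × Int × Int)))).items = [] from rfl,
    List.nil_append, List.map_map, hitemsM, List.map_map]
  -- rewrite the B side
  rw [PySem.Dict.items_eq_map_keys _ hnodupOut PySem.Dict.empty, hkeysOut, List.map_map]
  apply List.map_congr_left
  intro A hA
  simp only [Function.comp_apply]
  show (A, (pvInner topk (M.getD A PySem.Dict.empty)).items) = (A, _)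
  -- per-A inner dicts
  have hNAnodup : ((M.getD A PySem.Dict.empty).items.map (fun q => q.1)).Nodup := by
    show (M.getD A PySem.Dict.empty).keys.Nodup
    rw [hMA A]
    exact pv_group_nodup _ _ _ _ _ PySem.Dict.nodup_keys_empty
  have hInnerItems : (pvInner topk (M.getD A PySem.Dict.empty)).items
      = (M.getD A PySem.Dict.empty).items.map (fun q => (q.1, pvTrans topk q.2)) := by
    unfold pvInner
    rw [PySem.Dict.items_foldl_insert_fresh _ (fun q : Int × List (Int × Int × Int) => q.1)
        (fun q : Int × List (Int × Int × Int) => pvTrans topk q.2)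
        PySem.Dict.empty (fun a _ => PySem.Dict.contains_empty a.1) hNAnodup,
      show (PySem.Dict.empty : PySem.Dict Int (List (Int × Int × Int))).items = [] from rfl,
      List.nil_append]
  rw [hInnerItems, hMA A, pv_igroup_items, List.map_map]
  -- the B side at key A
  have hskelA : skel.getD A PySem.Dict.empty
      = (F.filter (fun t => t.1 == A)).foldl (fun dB t => dB.modify t.2.1 [] id) PySem.Dict.empty := by
    rw [hskel, pv_getD_foldl_modify F (fun t => t.1) PySem.Dict.empty
        (fun t dB => dB.modify t.2.1 [] id) PySem.Dict.empty A, PySem.Dict.getD_empty]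
  have houtA : (S.foldl (fun d t =>
      d.modify t.1 PySem.Dict.empty (fun dB => dB.modify t.2.1 [] (fun g =>
        if (g.length : Int) < topk then g ++ [(t.2.2.2.1, t.2.2.1, t.2.2.2.2)] else g))) skel).getD A PySem.Dict.empty
      = (S.filter (fun t => t.1 == A)).foldl
          (fun dB t => dB.modify t.2.1 [] (fun g =>
            if (g.length : Int) < topk then g ++ [(t.2.2.2.1, t.2.2.1, t.2.2.2.2)] else g))
          (skel.getD A PySem.Dict.empty) :=
    pv_getD_foldl_modify S (fun t => t.1) PySem.Dict.empty
      (fun t dB => dB.modify t.2.1 [] (fun g =>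
        if (g.length : Int) < topk then g ++ [(t.2.2.2.1, t.2.2.1, t.2.2.2.2)] else g)) skel A
  have hSAperm : (S.filter (fun t => t.1 == A)).Perm (F.filter (fun t => t.1 == A)) :=
    hSperm.filter _
  have hN0keys : (skel.getD A PySem.Dict.empty).keys
      = PySem.Set.ofList ((F.filter (fun t => t.1 == A)).map (fun t => t.2.1)) := by
    rw [hskelA, pv_group_keys, PySem.Dict.keys_empty, pv_update_ofList]
  have hN0nodup : (skel.getD A PySem.Dict.empty).keys.Nodup := by
    rw [hskelA]; exact pv_group_nodup _ _ _ _ _ PySem.Dict.nodup_keys_empty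
  have hInAkeys : ((S.filter (fun t => t.1 == A)).foldl
      (fun dB t => dB.modify t.2.1 [] (fun g =>
        if (g.length : Int) < topk then g ++ [(t.2.2.2.1, t.2.2.1, t.2.2.2.2)] else g))
      (skel.getD A PySem.Dict.empty)).keys
      = PySem.Set.ofList ((F.filter (fun t => t.1 == A)).map (fun t => t.2.1)) := by
    rw [pv_group_keys, hN0keys, pv_update_absorb]
    intro y hy
    rcases List.mem_map.mp hy with ⟨t, ht, rfl⟩
    exact (PySem.Set.mem_ofList _ _).mpr (List.mem_map_of_mem (hSAperm.mem_iff.mp ht))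
  have hInAnodup : ((S.filter (fun t => t.1 == A)).foldl
      (fun dB t => dB.modify t.2.1 [] (fun g =>
        if (g.length : Int) < topk then g ++ [(t.2.2.2.1, t.2.2.1, t.2.2.2.2)] else g))
      (skel.getD A PySem.Dict.empty)).keys.Nodup := pv_group_nodup _ _ _ _ _ hN0nodup
  rw [houtA, PySem.Dict.items_eq_map_keys _ hInAnodup ([] : List (Int × Int × Int)), hInAkeys]
  refine congrArg (Prod.mk A) ?_
  apply List.map_congr_left
  intro B hB
  show (B, pvTrans topk (((F.filter (fun t => t.1 == A)).filter (fun t => t.2.1 == B)).map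
      (fun t => (t.2.2.1, t.2.2.2.1, t.2.2.2.2)))) = (B, _)
  refine congrArg (Prod.mk B) ?_
  -- B side value at (A,B)
  rw [pv_getD_foldl_modify (S.filter (fun t => t.1 == A)) (fun t => t.2.1)
      ([] : List (Int × Int × Int))
      (fun t g => if (g.length : Int) < topk then g ++ [(t.2.2.2.1, t.2.2.1, t.2.2.2.2)] else g)
      (skel.getD A PySem.Dict.empty) B]
  have hN0B : (skel.getD A PySem.Dict.empty).getD B ([] : List (Int × Int × Int)) = [] := by
    rw [hskelA, pv_getD_foldl_modify (F.filter (fun t => t.1 == A)) (fun t => t.2.1)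
        ([] : List (Int × Int × Int)) (fun _ l => id l) PySem.Dict.empty B,
      PySem.Dict.getD_empty]
    exact PySem.List.foldl_ignore _ _
  rw [hN0B, List.filter_filter, List.filter_filter, hS,
    pv_filter_sorted (fun t => t.2.2.1) (fun t => (t.2.1 == B) && (t.1 == A)) F,
    pv_capped_fold topk hpre (fun t : Int × Int × Int × Int × Int => (t.2.2.2.1, t.2.2.1, t.2.2.2.2)) _ [],
    pv_core topk hpre (F.filter (fun t => (t.2.1 == B) && (t.1 == A)))]
  simp

-- ===== VERDICT (by name: the statement is the Claim_ definition above) =====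
theorem build_ab_topk_from_boundary_to_cluster_spec : Claim_equal_build_ab_topk_from_boundary_to_cluster := by
  intro D bs topk hdom hpre
  have h0 : (0 : Int) ≤ topk := hpre
  unfold Spec_build_ab_topk_from_boundary_to_cluster
  simp only [build_ab_topk_from_boundary_to_cluster, build_ab_topk_from_boundary_to_cluster_alt]
  rw [pv_items_fold (bs.foldl (fun d p => p.2.foldl (fun d b => d.insert b p.1) d) PySem.Dict.empty) D PySem.Dict.empty,
    pv_flat_fold (bs.foldl (fun d p => p.2.foldl (fun d b => d.insert b p.1) d) PySem.Dict.empty) D [],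
    List.nil_append]
  have h := pv_main topk h0
    (pvFlatF (bs.foldl (fun d p => p.2.foldl (fun d b => d.insert b p.1) d) PySem.Dict.empty) D)
  simp only [pvTrans] at h
  exact h
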